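-- pv_equiv track=rewrite | github.com/Caia-Tech/onyx | scripts/early_eval.py | _max_run_length
-- ===== SOURCE A (Python) =====
-- from typing import Any, Dict, Iterator, List, Optional, Tuple
--
-- def _max_run_length(tokens: List[int]) -> int:
--     if not tokens:
--         return 0
--     max_run = 1
--     cur_run = 1
--     prev = tokens[0]
--     for tid in tokens[1:]:
--         if tid == prev:
--             cur_run += 1
--             if cur_run > max_run:
--                 max_run = cur_run
--         else:
--             prev = tid
--             cur_run = 1
--     return max_run
-- ===== SOURCE B (Python) =====
-- from typing import List
--
--
-- def _max_run_length(tokens: List[int]) -> int: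
--     # Change-point formulation: collect the indices where the value changes,
--     # then the answer is the largest gap between consecutive cut points.
--     n = len(tokens)
--     cuts = [0] + [i for i in range(1, n) if tokens[i] != tokens[i - 1]] + [n]
--     return max(b - a for a, b in zip(cuts, cuts[1:]))
-- ===== Notes on version B (the rewrite author's own statement) =====
-- stated objective: alternative
-- what changed: B replaces A's incremental counter scan by a change-point formulation: it first builds the list of cut indices where the value changes (plus the endpoints 0 and n) and then returns the maximum gap between consecutive cuts.
import Mathlib
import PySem

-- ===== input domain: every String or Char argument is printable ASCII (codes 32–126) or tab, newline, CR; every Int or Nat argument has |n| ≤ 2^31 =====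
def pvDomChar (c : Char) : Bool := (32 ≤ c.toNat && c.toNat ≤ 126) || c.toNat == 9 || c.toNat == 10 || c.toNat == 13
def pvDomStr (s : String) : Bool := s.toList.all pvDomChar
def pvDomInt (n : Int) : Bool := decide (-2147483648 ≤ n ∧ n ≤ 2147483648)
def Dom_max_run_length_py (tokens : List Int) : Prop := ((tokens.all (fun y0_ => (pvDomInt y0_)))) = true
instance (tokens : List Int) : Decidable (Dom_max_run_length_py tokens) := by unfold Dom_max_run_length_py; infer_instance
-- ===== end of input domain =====

-- B replaces A's incremental counter scan by a change-point formulation: cut indices where the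
-- value changes, then the maximum gap between consecutive cuts (alternative algorithm, same cost).

-- ===== PORT A =====
-- A's for-loop over tokens[1:] with state (max_run, cur_run, prev), step for step.
def pvALoop (maxr cur prev : Int) : List Int → Int
  | [] => maxr
  | tid :: rest =>
    if tid = prev then
      let cur' := cur + 1
      pvALoop (if cur' > maxr then cur' else maxr) cur' prev rest
    else
      pvALoop maxr 1 tid rest

def max_run_length_py (tokens : List Int) : Int :=
  match tokens with
  | [] => 0
  | t :: rest => pvALoop 1 1 t rest

-- ===== PORT B =====
-- The comprehension [i for i in range(1, n) if tokens[i] != tokens[i-1]] is ported as an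
-- indexed recursion over the list: i visits exactly the valid indices 1..n-1 and compares the
-- element at i with the one at i-1, so this is exact on every input.
def pvChangesGo (i prev : Int) : List Int → List Int
  | [] => []
  | y :: ys => if y ≠ prev then i :: pvChangesGo (i + 1) y ys else pvChangesGo (i + 1) y ys

def pvChanges : List Int → List Int
  | [] => []
  | x :: xs => pvChangesGo 1 x xs

def max_run_length_py_alt (tokens : List Int) : Int :=
  let n : Int := tokens.length
  let cuts : List Int := 0 :: (pvChanges tokens ++ [n])
  -- zip(cuts, cuts[1:]) → zipWith over cuts and its tail (cuts is always nonempty)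
  let diffs : List Int := List.zipWith (fun a b => b - a) cuts cuts.tail
  match diffs with
  | d :: ds => ds.foldl max d   -- Python max over this always-nonempty generator
  | [] => 0                     -- unreachable: cuts always has ≥ 2 elements

-- ===== PRECONDITION & SPEC =====
def Spec_max_run_length_py (tokens : List Int) (out : Int) : Prop := out = max_run_length_py_alt tokens
instance (tokens : List Int) (out : Int) : Decidable (Spec_max_run_length_py tokens out) := by unfold Spec_max_run_length_py; infer_instance

-- ===== CLAIM (what is proved, stated in full; the proofs are below) =====
def Claim_equal_max_run_length_py : Prop := ∀ (tokens : List Int), Dom_max_run_length_py tokens → Spec_max_run_length_py tokens (max_run_length_py tokens)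

-- ===== LEMMAS AND PROOFS =====

-- proof-side reference: the list of run lengths of maximal equal runs
def pvRunLensGo (prev cnt : Int) : List Int → List Int
  | [] => [cnt]
  | y :: ys => if y = prev then pvRunLensGo prev (cnt + 1) ys else cnt :: pvRunLensGo y 1 ys

theorem foldl_max_assoc (xs : List Int) (a b : Int) :
    List.foldl max (max a b) xs = max a (List.foldl max b xs) := by
  induction xs generalizing b with
  | nil => rfl
  | cons x xs ih =>
    simp only [List.foldl_cons]
    rw [max_assoc, ih]

theorem runLensGo_fold_ge (rest : List Int) (prev c : Int) :
    c ≤ List.foldl max 0 (pvRunLensGo prev c rest) := by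
  induction rest generalizing prev c with
  | nil => simp [pvRunLensGo]
  | cons y ys ih =>
    simp only [pvRunLensGo]
    split_ifs with h
    · exact le_trans (by omega) (ih prev (c + 1))
    · simp only [List.foldl_cons]
      rw [show max 0 c = max c 0 from max_comm _ _, foldl_max_assoc]
      exact le_max_left _ _

-- A's loop computes the max of the run lengths
theorem aLoop_eq (rest : List Int) (prev maxr cur : Int)
    (h1 : cur ≤ maxr) (h2 : 1 ≤ cur) :
    pvALoop maxr cur prev rest = max maxr (List.foldl max 0 (pvRunLensGo prev cur rest)) := by
  induction rest generalizing prev maxr cur with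
  | nil =>
    simp [pvALoop, pvRunLensGo]
    omega
  | cons y ys ih =>
    simp only [pvALoop, pvRunLensGo]
    split_ifs with h h'
    · rw [ih prev (cur + 1) (cur + 1) le_rfl (by omega)]
      have hge := runLensGo_fold_ge ys prev (cur + 1)
      omega
    · rw [ih prev maxr (cur + 1) (by omega) (by omega)]
    · rw [ih y maxr 1 (le_trans h2 h1) le_rfl]
      simp only [List.foldl_cons]
      rw [show max 0 cur = max cur 0 from max_comm _ _, foldl_max_assoc]
      omega

-- the gaps between consecutive cut points are exactly the run lengths
theorem gaps_changes (xs : List Int) (prev i c : Int) :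
    List.zipWith (fun a b => b - a)
      ((i - c) :: (pvChangesGo i prev xs ++ [i + xs.length]))
      (pvChangesGo i prev xs ++ [i + xs.length]) = pvRunLensGo prev c xs := by
  induction xs generalizing prev i c with
  | nil => simp [pvChangesGo, pvRunLensGo]
  | cons y ys ih =>
    simp only [pvChangesGo, pvRunLensGo, List.length_cons]
    push_cast
    by_cases h : y = prev
    · subst h
      rw [if_neg (by simp), if_pos rfl]
      rw [show i - c = (i + 1) - (c + 1) by ring,
          show i + ((ys.length : Int) + 1) = (i + 1) + ys.length by ring]
      exact ih y (i + 1) (c + 1)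
    · rw [if_pos h, if_neg h, List.cons_append, List.zipWith_cons_cons]
      have hih := ih y (i + 1) 1
      rw [show (i : Int) + 1 - 1 = i by ring,
          show (i : Int) + 1 + ys.length = i + (ys.length + 1) by ring] at hih
      rw [show i - (i - c) = c by ring, hih]

-- pvRunLensGo is nonempty with head ≥ cnt
theorem runLensGo_head (xs : List Int) (prev c : Int) :
    ∃ d ds, pvRunLensGo prev c xs = d :: ds ∧ c ≤ d := by
  induction xs generalizing prev c with
  | nil => exact ⟨c, [], rfl, le_rfl⟩
  | cons y ys ih =>
    simp only [pvRunLensGo]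
    split_ifs with h
    · obtain ⟨d, ds, he, hd⟩ := ih prev (c + 1)
      exact ⟨d, ds, he, by omega⟩
    · exact ⟨c, _, rfl, le_rfl⟩

theorem le_foldl_max (ds : List Int) (d : Int) : d ≤ List.foldl max d ds := by
  have := foldl_max_assoc ds d d
  rw [max_self] at this
  rw [this]; exact le_max_left _ _

-- ===== VERDICT (by name: the statement is the Claim_ definition above) =====
theorem max_run_length_py_spec : Claim_equal_max_run_length_py := by
  intro tokens _
  unfold Spec_max_run_length_py max_run_length_py max_run_length_py_alt
  cases tokens with
  | nil => rfl
  | cons t rest =>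
    simp only [pvChanges, List.length_cons, List.tail_cons]
    push_cast
    have hg := gaps_changes rest t 1 1
    rw [show (1 : Int) - 1 = 0 by ring,
        show (1 : Int) + rest.length = (rest.length : Int) + 1 by ring] at hg
    rw [hg]
    obtain ⟨d, ds, he, hd⟩ := runLensGo_head rest t 1
    rw [he]
    show pvALoop 1 1 t rest = ds.foldl max d
    rw [aLoop_eq rest t 1 1 le_rfl le_rfl, he]
    simp only [List.foldl_cons]
    rw [show max 0 d = d by omega]
    have := le_foldl_max ds d
    omega
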